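-- pv_equiv track=rewrite | github.com/Ma-Yier/MultiGRank | cmp.py | cmpList2
-- ===== SOURCE A (Python) =====
-- def cmpList2(l1, l2, dict1):
--     n = min([len(l1), len(l2)])
--     same = []
--     ess = 0
--     for i in range(n):
--         same.append(len(set(l1[:i+1]).intersection(set(l2[:i+1]))))
--         if l2[i] in dict1:
--             ess += 1
--         same[i] += ess
--     return same
-- ===== SOURCE B (Python) =====
-- def cmpList2(l1, l2, dict1):
--     seen1, seen2 = set(), set()
--     inter = 0
--     ess = 0
--     same = []
--     for x, y in zip(l1, l2):
--         if x not in seen1: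
--             if x in seen2:
--                 inter += 1
--             seen1.add(x)
--         if y not in seen2:
--             if y in seen1:
--                 inter += 1
--             seen2.add(y)
--         if y in dict1:
--             ess += 1
--         same.append(inter + ess)
--     return same
-- ===== Notes on version B (the rewrite author's own statement) =====
-- stated objective: faster
-- what changed: B replaces A's per-index rebuild of both prefix sets and their intersection (and the repeated dict membership test) with a single pass over zip(l1,l2) that maintains two seen-sets, a running intersection counter and a running membership counter.
import Mathlib
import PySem

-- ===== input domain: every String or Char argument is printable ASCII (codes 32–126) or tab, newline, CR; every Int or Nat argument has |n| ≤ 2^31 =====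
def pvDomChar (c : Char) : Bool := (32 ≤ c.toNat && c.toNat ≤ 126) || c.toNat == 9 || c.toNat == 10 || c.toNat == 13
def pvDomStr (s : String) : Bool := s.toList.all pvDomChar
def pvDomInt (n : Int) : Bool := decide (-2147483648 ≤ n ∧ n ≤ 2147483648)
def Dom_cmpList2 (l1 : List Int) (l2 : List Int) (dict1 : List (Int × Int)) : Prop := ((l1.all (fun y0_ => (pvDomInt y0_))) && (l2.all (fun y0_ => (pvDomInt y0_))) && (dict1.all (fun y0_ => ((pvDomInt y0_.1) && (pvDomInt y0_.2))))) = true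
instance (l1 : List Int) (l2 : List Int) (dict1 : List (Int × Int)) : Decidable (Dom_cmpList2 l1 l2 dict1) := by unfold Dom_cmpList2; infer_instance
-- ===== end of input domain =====

-- B is a one-pass re-implementation (running intersection and membership counters) of A's
-- per-prefix set rebuilding; objective: faster (O(n) vs O(n^2)). Return value only; neither mutates.

-- ===== PORT A =====
-- transliteration of A: for i in range(n): same.append(len(set(l1[:i+1]) & set(l2[:i+1]))); if l2[i] in dict1: ess += 1; same[i] += ess
def cmpList2 (l1 : List Int) (l2 : List Int) (dict1 : List (Int × Int)) : List Int :=
  let n : Int := min (PySem.List.len l1) (PySem.List.len l2)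
  let st := (PySem.List.pyRange 0 n 1).foldl
    (fun (st : List Int × Int) i =>
      let same := st.1 ++ [PySem.Set.len (PySem.Set.inter
        (PySem.Set.ofList (PySem.List.slice l1 none (some (i + 1))))
        (PySem.Set.ofList (PySem.List.slice l2 none (some (i + 1)))))]
      let ess := if dict1.any (fun p => p.1 == PySem.List.pyGetD l2 i 0) then st.2 + 1 else st.2
      (PySem.List.pySetD same i (PySem.List.pyGetD same i 0 + ess), ess))
    ([], 0)
  st.1

-- ===== PORT B =====
-- transliteration of Source B: one pass over zip(l1, l2) with seen-sets and running counters
-- (the loop body of Source B, as a named step function)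
def bStep (dict1 : List (Int × Int))
    (st : PySem.Set Int × PySem.Set Int × Int × Int × List Int) (xy : Int × Int) :
    PySem.Set Int × PySem.Set Int × Int × Int × List Int :=
  let s1 := st.1; let s2 := st.2.1; let inter := st.2.2.1
  let ess := st.2.2.2.1; let same := st.2.2.2.2
  let x := xy.1; let y := xy.2
  let p1 : Int × PySem.Set Int :=
    if s1.contains x then (inter, s1)
    else ((if s2.contains x then inter + 1 else inter), PySem.Set.add s1 x)
  let inter := p1.1; let s1 := p1.2
  let p2 : Int × PySem.Set Int :=
    if s2.contains y then (inter, s2)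
    else ((if s1.contains y then inter + 1 else inter), PySem.Set.add s2 y)
  let inter := p2.1; let s2 := p2.2
  let ess := if dict1.any (fun p => p.1 == y) then ess + 1 else ess
  (s1, s2, inter, ess, same ++ [inter + ess])

def cmpList2_alt (l1 : List Int) (l2 : List Int) (dict1 : List (Int × Int)) : List Int :=
  ((List.zip l1 l2).foldl (bStep dict1)
    (PySem.Set.empty, PySem.Set.empty, 0, 0, [])).2.2.2.2

-- ===== PRECONDITION & SPEC =====
def Spec_cmpList2 (l1 : List Int) (l2 : List Int) (dict1 : List (Int × Int)) (out : List Int) : Prop := out = cmpList2_alt l1 l2 dict1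
instance (l1 : List Int) (l2 : List Int) (dict1 : List (Int × Int)) (out : List Int) : Decidable (Spec_cmpList2 l1 l2 dict1 out) := by unfold Spec_cmpList2; infer_instance

-- ===== CLAIM (what is proved, stated in full; the proofs are below) =====
def Claim_equal_cmpList2 : Prop := ∀ (l1 : List Int) (l2 : List Int) (dict1 : List (Int × Int)), Dom_cmpList2 l1 l2 dict1 → Spec_cmpList2 l1 l2 dict1 (cmpList2 l1 l2 dict1)

-- ===== LEMMAS AND PROOFS =====

-- common closed form: value written at step k (0-based)
def pvF (l1 l2 : List Int) (k : Nat) : Int :=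
  PySem.Set.len (PySem.Set.inter (PySem.Set.ofList (l1.take k)) (PySem.Set.ofList (l2.take k)))

def pvE (dict1 : List (Int × Int)) (l2 : List Int) (k : Nat) : Int :=
  ((l2.take k).countP (fun y => dict1.any (fun p => p.1 == y)) : Int)

def pvOut (l1 l2 : List Int) (dict1 : List (Int × Int)) (m : Nat) : List Int :=
  (List.range m).map (fun k => pvF l1 l2 (k + 1) + pvE dict1 l2 (k + 1))

lemma pvE_succ (dict1 : List (Int × Int)) (l2 : List Int) (k : Nat) (hk : k < l2.length) :
    pvE dict1 l2 (k + 1) =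
      pvE dict1 l2 k + (if dict1.any (fun p => p.1 == l2[k]) then 1 else 0) := by
  unfold pvE
  rw [List.take_add_one, List.getElem?_eq_getElem hk]
  simp only [Option.toList_some, List.countP_append, List.countP_cons, List.countP_nil]
  push_cast
  split <;> simp

lemma ofList_append_singleton (t : List Int) (x : Int) :
    PySem.Set.ofList (t ++ [x]) = PySem.Set.add (PySem.Set.ofList t) x := by
  simp [PySem.Set.ofList, List.foldl_append]

lemma add_of_mem (s : PySem.Set Int) (x : Int) (h : x ∈ s) :
    PySem.Set.add s x = s := by
  simp [PySem.Set.add, List.contains_eq_mem, h]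

lemma add_of_not_mem (s : PySem.Set Int) (x : Int) (h : x ∉ s) :
    PySem.Set.add s x = s ++ [x] := by
  simp [PySem.Set.add, List.contains_eq_mem, h]

-- adding on the left of an intersection
lemma inter_len_add_left (s t : PySem.Set Int) (x : Int) :
    PySem.Set.len (PySem.Set.inter (PySem.Set.add s x) t) =
      PySem.Set.len (PySem.Set.inter s t) + (if x ∉ s ∧ x ∈ t then 1 else 0) := by
  by_cases hs : x ∈ s
  · simp [hs]
  · rw [add_of_not_mem s x hs]
    by_cases ht : x ∈ t <;>
      simp [PySem.Set.inter, PySem.Set.len, List.contains_eq_mem, hs, ht, List.filter_append]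

-- adding on the right of an intersection (needs left operand without duplicates)
lemma inter_len_add_right (s t : PySem.Set Int) (y : Int) (hs : s.Nodup) :
    PySem.Set.len (PySem.Set.inter s (PySem.Set.add t y)) =
      PySem.Set.len (PySem.Set.inter s t) + (if y ∉ t ∧ y ∈ s then 1 else 0) := by
  by_cases ht : y ∈ t
  · simp [ht]
  · have hfil : ∀ (s' : List Int), s'.Nodup →
        (s'.filter (fun b => decide (b ∈ t) || decide (b = y))).length
          = (s'.filter (fun b => decide (b ∈ t))).length + (if y ∈ s' then 1 else 0) := by
      intro s' hns
      induction s' with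
      | nil => simp
      | cons a s' ih =>
        have ha : a ∉ s' := (List.nodup_cons.mp hns).1
        have hns' : s'.Nodup := (List.nodup_cons.mp hns).2
        have ihs := ih hns'
        by_cases hay : a = y
        · subst hay
          simp only [List.filter_cons, ht, decide_false, decide_true, Bool.or_true]
          simp [ihs, ha]
        · have hya : y ≠ a := fun h => hay h.symm
          by_cases hat : a ∈ t <;> by_cases hys : y ∈ s' <;>
            simp [hat, hay, hya, hys, ihs]
    rw [add_of_not_mem t y ht]
    have hc1 : List.filter (fun b => (t ++ [y]).contains b) s
        = s.filter (fun b => decide (b ∈ t) || decide (b = y)) := by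
      apply List.filter_congr; intro b _; simp [List.contains_eq_mem]
    have hc2 : List.filter (fun b => t.contains b) s
        = s.filter (fun b => decide (b ∈ t)) := by
      apply List.filter_congr; intro b _; simp [List.contains_eq_mem]
    simp only [PySem.Set.inter, PySem.Set.len, hc1, hc2, hfil s hs, ht, not_false_iff, true_and]
    push_cast
    by_cases hys : y ∈ s <;> simp [hys]

lemma set_nodup_add (s : PySem.Set Int) (x : Int) (hs : s.Nodup) :
    (PySem.Set.add s x).Nodup := by
  by_cases h : x ∈ s
  · simpa [add_of_mem s x h] using hs
  · rw [add_of_not_mem s x h]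
    refine List.Nodup.append hs (List.nodup_singleton x) ?_
    intro a ha hb
    simp only [List.mem_singleton] at hb
    subst hb; exact h ha

lemma getD_append_len (s : List Int) (v d : Int) (j : Nat) (h : s.length = j) :
    (s ++ [v]).getD j d = v := by subst h; simp

lemma set_append_len (s : List Int) (v w : Int) (j : Nat) (h : s.length = j) :
    (s ++ [v]).set j w = s ++ [w] := by subst h; simp

-- the A-side loop, characterised
lemma A_loop (l1 l2 : List Int) (dict1 : List (Int × Int)) (j : Nat)
    (hj1 : j ≤ l1.length) (hj2 : j ≤ l2.length) :
    (PySem.List.pyRange 0 (j : Int) 1).foldl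
      (fun (st : List Int × Int) i =>
        let same := st.1 ++ [PySem.Set.len (PySem.Set.inter
          (PySem.Set.ofList (PySem.List.slice l1 none (some (i + 1))))
          (PySem.Set.ofList (PySem.List.slice l2 none (some (i + 1)))))]
        let ess := if dict1.any (fun p => p.1 == PySem.List.pyGetD l2 i 0) then st.2 + 1 else st.2
        (PySem.List.pySetD same i (PySem.List.pyGetD same i 0 + ess), ess))
      ([], 0) = (pvOut l1 l2 dict1 j, pvE dict1 l2 j) := by
  induction j with
  | zero => simp [PySem.List.pyRange_one_eq_nil, pvOut, pvE]
  | succ j ih =>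
    have hj1' : j ≤ l1.length := Nat.le_of_succ_le hj1
    have hj2' : j ≤ l2.length := Nat.le_of_succ_le hj2
    have hcast : ((j : Int) + 1) = ((j + 1 : Nat) : Int) := by push_cast; ring
    have hrange : PySem.List.pyRange 0 ((j + 1 : Nat) : Int) 1
        = PySem.List.pyRange 0 (j : Int) 1 ++ [(j : Int)] := by
      rw [← hcast]; exact PySem.List.pyRange_one_succ_right (by positivity)
    rw [hrange, List.foldl_append, ih hj1' hj2']
    have hlen : (pvOut l1 l2 dict1 j).length = j := by simp [pvOut]
    have hget2 : PySem.List.pyGetD l2 (j : Int) 0 = l2[j] := by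
      rw [PySem.List.pyGetD_natCast]
      exact List.getD_eq_getElem l2 0 (by omega)
    simp only [List.foldl_cons, List.foldl_nil]
    rw [hcast, PySem.List.slice_to_natCast, PySem.List.slice_to_natCast, hget2]
    have hv : PySem.Set.len (PySem.Set.inter (PySem.Set.ofList (l1.take (j+1)))
        (PySem.Set.ofList (l2.take (j+1)))) = pvF l1 l2 (j+1) := rfl
    rw [hv]
    rw [PySem.List.pyGetD_natCast, PySem.List.pySetD_natCast,
      getD_append_len _ _ _ _ hlen, set_append_len _ _ _ _ hlen]
    have hE := pvE_succ dict1 l2 j (by omega)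
    have hEss : (if dict1.any (fun p => p.1 == l2[j]) then pvE dict1 l2 j + 1 else pvE dict1 l2 j)
        = pvE dict1 l2 (j + 1) := by
      rw [hE]
      by_cases hc : dict1.any (fun p => p.1 == l2[j]) = true
      · (try simp only [if_pos hc])
        split
        · omega
        · next h => exact absurd hc h
      · (try simp only [if_neg hc])
        split
        · next h => exact absurd h hc
        · omega
    rw [hEss]
    have hOut : pvOut l1 l2 dict1 (j + 1)
        = pvOut l1 l2 dict1 j ++ [pvF l1 l2 (j + 1) + pvE dict1 l2 (j + 1)] := by
      simp [pvOut, List.range_succ]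
    rw [hOut]

lemma ite_add_one (c : Bool) (e : Int) :
    (if c = true then e + 1 else e) = e + (if c = true then 1 else 0) := by
  cases c <;> simp

-- one step of B, characterised against the closed form
lemma bStep_eq (dict1 : List (Int × Int)) (s1 s2 : PySem.Set Int) (inter ess : Int)
    (same : List Int) (x y : Int) (hn1 : s1.Nodup)
    (hI : inter = PySem.Set.len (PySem.Set.inter s1 s2)) :
    bStep dict1 (s1, s2, inter, ess, same) (x, y) =
      (PySem.Set.add s1 x, PySem.Set.add s2 y,
       PySem.Set.len (PySem.Set.inter (PySem.Set.add s1 x) (PySem.Set.add s2 y)),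
       ess + (if dict1.any (fun p => p.1 == y) then 1 else 0),
       same ++ [PySem.Set.len (PySem.Set.inter (PySem.Set.add s1 x) (PySem.Set.add s2 y))
         + (ess + (if dict1.any (fun p => p.1 == y) then 1 else 0))]) := by
  subst hI
  have hR := inter_len_add_right (PySem.Set.add s1 x) s2 y (set_nodup_add s1 x hn1)
  have hL := inter_len_add_left s1 s2 x
  simp only [bStep, PySem.Set.contains, List.contains_eq_mem, decide_eq_true_eq]
  rw [hR, hL]
  by_cases h1 : x ∈ s1 <;> by_cases h2 : x ∈ s2 <;> by_cases h3 : y ∈ s2 <;>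
    by_cases h4 : y ∈ s1 <;> by_cases h5 : y = x <;>
    simp [PySem.Set.add, List.contains_eq_mem, h1, h2, h3, h4, h5, ite_add_one]

-- the B-side loop, characterised
lemma B_loop (l1 l2 : List Int) (dict1 : List (Int × Int)) (j : Nat)
    (hj : j ≤ min l1.length l2.length) :
    ((List.zip l1 l2).take j).foldl (bStep dict1)
      (PySem.Set.empty, PySem.Set.empty, 0, 0, [])
    = (PySem.Set.ofList (l1.take j), PySem.Set.ofList (l2.take j),
       pvF l1 l2 j, pvE dict1 l2 j, pvOut l1 l2 dict1 j) := by
  induction j with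
  | zero => simp [pvF, pvE, pvOut, PySem.Set.ofList, PySem.Set.empty, PySem.Set.inter]
  | succ j ih =>
    have hj' : j ≤ min l1.length l2.length := Nat.le_of_succ_le hj
    have hj1 : j < l1.length := by omega
    have hj2 : j < l2.length := by omega
    have hz : j < (l1.zip l2).length := by simp [List.length_zip]; omega
    rw [List.take_add_one, List.getElem?_eq_getElem hz, List.getElem_zip]
    simp only [Option.toList_some, List.foldl_append, List.foldl_cons, List.foldl_nil, ih hj']
    have hn1 : (PySem.Set.ofList (l1.take j)).Nodup := PySem.Set.nodup_ofList _
    have ht1 : l1.take (j + 1) = l1.take j ++ [l1[j]] := by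
      rw [List.take_add_one, List.getElem?_eq_getElem hj1]; simp
    have ht2 : l2.take (j + 1) = l2.take j ++ [l2[j]] := by
      rw [List.take_add_one, List.getElem?_eq_getElem hj2]; simp
    have hS1 : PySem.Set.ofList (l1.take (j + 1))
        = PySem.Set.add (PySem.Set.ofList (l1.take j)) l1[j] := by
      rw [ht1, ofList_append_singleton]
    have hS2 : PySem.Set.ofList (l2.take (j + 1))
        = PySem.Set.add (PySem.Set.ofList (l2.take j)) l2[j] := by
      rw [ht2, ofList_append_singleton]
    have hF : pvF l1 l2 (j + 1)
        = PySem.Set.len (PySem.Set.inter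
            (PySem.Set.add (PySem.Set.ofList (l1.take j)) l1[j])
            (PySem.Set.add (PySem.Set.ofList (l2.take j)) l2[j])) := by
      unfold pvF; rw [hS1, hS2]
    have hE := pvE_succ dict1 l2 j hj2
    have hOut : pvOut l1 l2 dict1 (j + 1)
        = pvOut l1 l2 dict1 j ++ [pvF l1 l2 (j + 1) + pvE dict1 l2 (j + 1)] := by
      simp [pvOut, List.range_succ]
    rw [bStep_eq dict1 (PySem.Set.ofList (l1.take j)) (PySem.Set.ofList (l2.take j))
      (pvF l1 l2 j) (pvE dict1 l2 j) (pvOut l1 l2 dict1 j) l1[j] l2[j] hn1 (by rfl)]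
    rw [← hF, ← hS1, ← hS2, ← hE, ← hOut]

-- final evaluation lemmas connecting the ports to the closed form
lemma len_min_cast (l1 l2 : List Int) :
    min (PySem.List.len l1) (PySem.List.len l2) = ((min l1.length l2.length : Nat) : Int) := by
  simp [PySem.List.len, Nat.cast_min]

lemma A_eval (l1 l2 : List Int) (dict1 : List (Int × Int)) :
    cmpList2 l1 l2 dict1 = pvOut l1 l2 dict1 (min l1.length l2.length) := by
  show ((PySem.List.pyRange 0 (min (PySem.List.len l1) (PySem.List.len l2)) 1).foldl
      (fun (st : List Int × Int) i =>
        let same := st.1 ++ [PySem.Set.len (PySem.Set.inter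
          (PySem.Set.ofList (PySem.List.slice l1 none (some (i + 1))))
          (PySem.Set.ofList (PySem.List.slice l2 none (some (i + 1)))))]
        let ess := if dict1.any (fun p => p.1 == PySem.List.pyGetD l2 i 0) then st.2 + 1 else st.2
        (PySem.List.pySetD same i (PySem.List.pyGetD same i 0 + ess), ess))
      ([], 0)).1 = pvOut l1 l2 dict1 (min l1.length l2.length)
  rw [len_min_cast, A_loop l1 l2 dict1 (min l1.length l2.length)
    (Nat.min_le_left _ _) (Nat.min_le_right _ _)]

lemma B_eval (l1 l2 : List Int) (dict1 : List (Int × Int)) :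
    cmpList2_alt l1 l2 dict1 = pvOut l1 l2 dict1 (min l1.length l2.length) := by
  show ((List.zip l1 l2).foldl (bStep dict1)
      (PySem.Set.empty, PySem.Set.empty, 0, 0, [])).2.2.2.2
    = pvOut l1 l2 dict1 (min l1.length l2.length)
  have hfull : (List.zip l1 l2).take (min l1.length l2.length) = List.zip l1 l2 := by
    apply List.take_of_length_le; simp [List.length_zip]
  rw [← hfull, B_loop l1 l2 dict1 (min l1.length l2.length) (le_refl _)]

-- ===== VERDICT (by name: the statement is the Claim_ definition above) =====
theorem cmpList2_spec : Claim_equal_cmpList2 := by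
  intro l1 l2 dict1 _
  unfold Spec_cmpList2
  rw [A_eval, B_eval]
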